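-- pv_equiv track=rewrite | github.com/ibraheem-moosa/protein-asa-prediction | src/transform_input.py | windows_from_seq
-- ===== SOURCE A (Python) =====
-- def windows_from_seq(aas, ws):
--     t_aas = []
--     for i in range(len(aas)):
--         start = max(0, i - ws)
--         end = min(i + ws + 1, len(aas) - 1)
--         w = (start - (i - ws)) * [21] +  aas[start:end] + (i + ws + 1 - end) * [21]
--         assert(len(w) == 2 * ws + 1)
--         t_aas.append(w)
--     return t_aas
-- ===== SOURCE B (Python) =====
-- def windows_from_seq(aas, ws):
--     n = len(aas)
--
--     def at(j):
--         # positions outside 0..n-2 (including the final, masked residue) read as padding 21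
--         return aas[j] if 0 <= j < n - 1 else 21
--
--     return [[at(i + d) for d in range(-ws, ws + 1)] for i in range(n)]
-- ===== Notes on version B (the rewrite author's own statement) =====
-- stated objective: idiomatic
-- what changed: B reads each window element through one total accessor (out-of-range and the masked final residue read as 21) and maps it over the offset range, replacing A's three-segment pad-count/slice concatenation and assert; Pre_ excludes ws < 0 on nonempty input, where A's assert raises AssertionError.
import Mathlib
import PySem

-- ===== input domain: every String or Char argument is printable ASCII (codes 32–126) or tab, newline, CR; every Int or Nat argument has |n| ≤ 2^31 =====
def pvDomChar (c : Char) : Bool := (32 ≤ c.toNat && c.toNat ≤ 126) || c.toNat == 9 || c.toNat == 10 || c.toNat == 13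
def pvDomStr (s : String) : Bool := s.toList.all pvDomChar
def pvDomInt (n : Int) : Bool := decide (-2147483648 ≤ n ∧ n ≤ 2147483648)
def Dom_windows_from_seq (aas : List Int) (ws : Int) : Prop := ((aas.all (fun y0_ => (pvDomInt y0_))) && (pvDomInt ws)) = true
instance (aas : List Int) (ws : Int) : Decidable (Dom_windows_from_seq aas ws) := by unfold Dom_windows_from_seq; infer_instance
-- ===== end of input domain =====

-- B reads window elements through one total accessor mapped over the offset range (idiomatic decomposition); equal to A on Pre_ (A's assert raises AssertionError for ws < 0 on nonempty input).

-- ===== PORT A =====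
-- the window built for position i (A's local w, incl. its pad-count arithmetic)
def windows_from_seq_w (aas : List Int) (ws i : Int) : List Int :=
  let start := max 0 (i - ws)
  let stop := min (i + ws + 1) ((aas.length : Int) - 1)
  PySem.List.pyRepeat [21] (start - (i - ws)) ++ PySem.List.slice aas (some start) (some stop)
    ++ PySem.List.pyRepeat [21] (i + ws + 1 - stop)

-- A's assert(len(w) == 2*ws+1) holds on every input admitted by Pre_; where it would fail Python raises (excluded by Pre_)
def windows_from_seq (aas : List Int) (ws : Int) : List (List Int) :=
  (PySem.List.pyRange 0 (aas.length : Int) 1).foldl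
    (fun t_aas i => t_aas ++ [windows_from_seq_w aas ws i]) []

-- ===== PORT B =====
-- B's local accessor `at(j)`: the guard guarantees the index is in range, so `.getD 21` is never the fallback
def windows_from_seq_at (aas : List Int) (n j : Int) : Int :=
  if 0 ≤ j ∧ j < n - 1 then (PySem.List.pyGet? aas j).getD 21 else 21

def windows_from_seq_alt (aas : List Int) (ws : Int) : List (List Int) :=
  let n := (aas.length : Int)
  (PySem.List.pyRange 0 n 1).map (fun i =>
    (PySem.List.pyRange (-ws) (ws + 1) 1).map (fun d => windows_from_seq_at aas n (i + d)))

-- ===== PRECONDITION & SPEC =====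
-- A's assert fails (AssertionError) whenever ws < 0 and aas is nonempty; those inputs are excluded.
def Pre_windows_from_seq (aas : List Int) (ws : Int) : Prop := aas = [] ∨ 0 ≤ ws
instance (aas : List Int) (ws : Int) : Decidable (Pre_windows_from_seq aas ws) := by unfold Pre_windows_from_seq; infer_instance
def pvWitness_windows_from_seq : List Int × Int := ([3, 7, 21, 0], 2)

def Spec_windows_from_seq (aas : List Int) (ws : Int) (out : List (List Int)) : Prop := out = windows_from_seq_alt aas ws
instance (aas : List Int) (ws : Int) (out : List (List Int)) : Decidable (Spec_windows_from_seq aas ws out) := by unfold Spec_windows_from_seq; infer_instance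

-- ===== CLAIM (what is proved, stated in full; the proofs are below) =====
def Claim_equal_windows_from_seq : Prop := ∀ (aas : List Int) (ws : Int), Dom_windows_from_seq aas ws → Pre_windows_from_seq aas ws → Spec_windows_from_seq aas ws (windows_from_seq aas ws)

-- ===== LEMMAS AND PROOFS =====

-- core Nat-level fact: A's three-piece window equals the offset-indexed accessor map
lemma at_eq (aas : List Int) (x : Int) :
    windows_from_seq_at aas (aas.length : Int) x
      = if 0 ≤ x then (aas.dropLast[x.toNat]?).getD 21 else 21 := by
  unfold windows_from_seq_at
  by_cases h0 : 0 ≤ x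
  · rw [if_pos h0]
    by_cases h1 : x < (aas.length : Int) - 1
    · rw [if_pos ⟨h0, h1⟩, PySem.List.pyGet?_of_nonneg _ h0]
      simp only [List.dropLast_eq_take, List.getElem?_take]
      rw [if_pos (by omega)]
    · rw [if_neg (by omega), List.getElem?_eq_none (by simp [List.length_dropLast]; omega)]
      rfl
  · rw [if_neg (by omega), if_neg h0]

lemma win_core (aas : List Int) (W k : Nat) (hk : k < aas.length) :
    List.replicate (W - k) (21 : Int)
      ++ List.take (min (k + W + 1) (aas.length - 1) - (k - W)) (List.drop (k - W) aas)
      ++ List.replicate ((k + W + 1) - min (k + W + 1) (aas.length - 1)) 21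
    = List.map ((fun d => windows_from_seq_at aas (aas.length : Int) ((k : Int) + d)) ∘
          fun t : Nat => -(W : Int) + (t : Int)) (List.range (2 * W + 1)) := by
  apply List.ext_getElem?
  intro j
  by_cases hj : j < 2 * W + 1
  · rw [List.getElem?_map, List.getElem?_range hj]
    simp only [Option.map_some, Function.comp, at_eq, List.dropLast_eq_take,
      List.getElem?_append, List.getElem?_take, List.getElem?_drop, List.getElem?_replicate,
      List.length_append, List.length_replicate, List.length_take, List.length_drop]
    split_ifs <;> first
      | rfl
      | omega
      | (rw [List.getElem?_eq_getElem (by omega), List.getElem?_eq_getElem (by omega)]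
         simp only [Option.getD_some, Option.some.injEq]
         congr 1
         omega)
  · rw [List.getElem?_eq_none (by simp; omega), List.getElem?_eq_none (by simp; omega)]

-- per-position agreement on 0 ≤ ws
lemma win_eq (aas : List Int) (ws : Int) (hws : 0 ≤ ws) (i : Int) (h0 : 0 ≤ i)
    (hn : i < (aas.length : Int)) :
    windows_from_seq_w aas ws i
      = (PySem.List.pyRange (-ws) (ws + 1) 1).map
          (fun d => windows_from_seq_at aas (aas.length : Int) (i + d)) := by
  lift i to ℕ using h0 with k
  lift ws to ℕ using hws with W
  have hkn : k < aas.length := by exact_mod_cast hn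
  -- right side: range(-W, W+1) as a map over List.range (2W+1)
  rw [PySem.List.pyRange_one]
  have hlen : ((W : Int) + 1 - -(W : Int)).toNat = 2 * W + 1 := by omega
  rw [hlen, List.map_map]
  -- left side
  simp only [windows_from_seq_w]
  have hs : (0 : Int) ≤ max 0 ((k : Int) - (W : Int)) := le_max_left _ _
  have he : (0 : Int) ≤ min ((k : Int) + (W : Int) + 1) ((aas.length : Int) - 1) := by omega
  rw [PySem.List.pyRepeat_singleton, PySem.List.pyRepeat_singleton,
    PySem.List.slice_toNat aas hs he]
  have e1 : (max 0 ((k : Int) - (W : Int)) - ((k : Int) - (W : Int))).toNat = W - k := by omega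
  have e2 : (max 0 ((k : Int) - (W : Int))).toNat = k - W := by omega
  have e3 : (min ((k : Int) + (W : Int) + 1) ((aas.length : Int) - 1)).toNat
      = min (k + W + 1) (aas.length - 1) := by omega
  have e4 : ((k : Int) + (W : Int) + 1 - min ((k : Int) + (W : Int) + 1) ((aas.length : Int) - 1)).toNat
      = (k + W + 1) - min (k + W + 1) (aas.length - 1) := by omega
  rw [e1, e2, e3, e4]
  exact win_core aas W k hkn

-- ===== VERDICT (by name: the statement is the Claim_ definition above) =====
theorem windows_from_seq_spec : Claim_equal_windows_from_seq := by
  intro aas ws _ hpre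
  unfold Spec_windows_from_seq windows_from_seq windows_from_seq_alt
  rw [PySem.List.foldl_append_singleton_eq_map, List.nil_append]
  rcases hpre with h | hws
  · subst h
    rw [PySem.List.pyRange_one]
    simp
  · apply List.map_congr_left
    intro i hi
    rw [PySem.List.mem_pyRange_one] at hi
    exact win_eq aas ws hws i hi.1 hi.2
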